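-- pv_equiv track=rewrite | github.com/cmy12345/ios-app | serverFlask_pi_remote_4_him_rsa.py | unsign2hex
-- ===== SOURCE A (Python) =====
-- def unsign2hex(ls):  # The function to convert the shifted binary data sent by TIC2000 to hex
--     string = ''
--     for i in range(len(ls)):
--         binary_element = bin(int(ls[i]))
--         binary_element = binary_element[2:]
--         if len(binary_element) < 8:
--             binary_element = '0' * (8 - len(binary_element)) + binary_element
--         string += binary_element
--     string = string[1:] + '0'
--     res = hex(int(string, 2))
--     return res
-- ===== SOURCE B (Python) =====
-- def unsign2hex(ls):
--     value = 0
--     width = 0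
--     for e in ls:
--         e = int(e)
--         w = max(8, e.bit_length())
--         value = (value << w) | e
--         width += w
--     return hex((value << 1) & ((1 << width) - 1))
-- ===== Notes on version B (the rewrite author's own statement) =====
-- stated objective: alternative
-- what changed: B replaces A's binary-string concatenation, string slicing and base-2 reparse with a single integer accumulator and a running bit-width counter, performing the final left-shift-and-drop-top-bit as (value << 1) & ((1 << width) - 1); Pre_ excludes lists with a negative element, on which A raises ValueError except in the accidental corner where only the first element is negative with |e| >= 64 (its stray 'b' character is swallowed by A's [1:] slice).
-- outside the precondition, e.g. on unsign2hex([-100]): A returns '0xc8', B returns '0x38'; on unsign2hex([-100, 3]): A returns '0xc806', B returns '0x3806'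
import Mathlib
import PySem

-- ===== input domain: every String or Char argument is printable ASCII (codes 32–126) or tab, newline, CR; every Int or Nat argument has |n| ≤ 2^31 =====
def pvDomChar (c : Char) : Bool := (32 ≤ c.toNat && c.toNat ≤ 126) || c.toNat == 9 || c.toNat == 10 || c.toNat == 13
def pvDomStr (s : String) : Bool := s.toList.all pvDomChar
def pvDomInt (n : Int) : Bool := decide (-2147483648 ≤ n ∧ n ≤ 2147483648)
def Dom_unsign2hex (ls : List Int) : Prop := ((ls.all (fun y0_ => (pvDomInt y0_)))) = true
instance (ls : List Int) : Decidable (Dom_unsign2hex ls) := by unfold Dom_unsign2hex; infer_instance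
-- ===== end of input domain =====

-- B replaces A's binary-string concatenation/slice/parse with an integer accumulator and a running
-- bit-width counter (objective: alternative decomposition, same asymptotic cost).

-- ===== PORT A =====
-- binary digits of a natural number, most significant first (bin(n)[2:] for n > 0)
def natBits : Nat → List Char
  | 0 => []
  | n + 1 => natBits ((n + 1) / 2) ++ [if (n + 1) % 2 = 1 then '1' else '0']
decreasing_by exact Nat.div_lt_self (Nat.succ_pos n) (by omega)

-- bin(n)[2:] for n ≥ 0 (Python's bin(0)[2:] = "0"); exact on Pre_ (negatives excluded: A raises)
def binChars (n : Nat) : List Char := if n = 0 then ['0'] else natBits n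

-- int(s, 2) for a string of '0'/'1' characters
def parseBin (cs : List Char) : Nat :=
  cs.foldl (fun a c => 2 * a + (if c = '1' then 1 else 0)) 0

-- hex digits, most significant first
def hexChars : Nat → List Char
  | 0 => []
  | n + 1 => hexChars ((n + 1) / 16) ++
      [(['0','1','2','3','4','5','6','7','8','9','a','b','c','d','e','f']).getD ((n + 1) % 16) '0']
decreasing_by exact Nat.div_lt_self (Nat.succ_pos n) (by omega)

-- Python's hex(n) for n ≥ 0 (shared library-call helper, used by both ports)
def pyHex (n : Nat) : String := String.ofList ('0' :: 'x' :: (if n = 0 then ['0'] else hexChars n))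

-- one iteration of A's loop body
def stepA (string : List Char) (e : Int) : List Char :=
  string ++ (if (binChars e.toNat).length < 8                           -- bin(int(e))[2:], padded
    then List.replicate (8 - (binChars e.toNat).length) '0' ++ binChars e.toNat
    else binChars e.toNat)

def unsign2hex (ls : List Int) : String :=
  let s := ls.foldl stepA ([] : List Char)
  let s' := s.drop 1 ++ ['0']                          -- string[1:] + '0'
  pyHex (parseBin s')                                  -- hex(int(string, 2))

-- ===== PORT B =====
-- int.bit_length() (library-call transliteration)
def bitLen : Nat → Nat
  | 0 => 0
  | n + 1 => bitLen ((n + 1) / 2) + 1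
decreasing_by exact Nat.div_lt_self (Nat.succ_pos n) (by omega)

-- Source B's loop body: shift the accumulator left by w = max(8, e.bit_length()) and or in e
def stepB (p : Nat × Nat) (e : Int) : Nat × Nat :=
  let w := max 8 (bitLen e.toNat)
  (p.1 <<< w ||| e.toNat, p.2 + w)

def unsign2hex_alt (ls : List Int) : String :=
  let vw := ls.foldl stepB ((0 : Nat), (0 : Nat))
  pyHex ((vw.1 <<< 1) &&& ((1 <<< vw.2) - 1))          -- hex((value << 1) & ((1 << width) - 1))

-- ===== PRECONDITION & SPEC =====
-- Pre_ excludes lists with a negative element: A raises ValueError on them (bin(-n)[2:] keeps a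
-- 'b' character, so int(string, 2) fails), except the accidental corner where only the first
-- element is negative with |e| >= 64 — there the stray 'b' happens to be swallowed by A's [1:]
-- slice and A returns an accidental value no one would specify (B returns its own
-- negative-arithmetic value there); both are artefacts, so that corner is excluded too.
def Pre_unsign2hex (ls : List Int) : Prop := ∀ e ∈ ls, 0 ≤ e
instance (ls : List Int) : Decidable (Pre_unsign2hex ls) := by unfold Pre_unsign2hex; infer_instance

def pvWitness_unsign2hex : List Int := [300, 5, 0]

def Spec_unsign2hex (ls : List Int) (out : String) : Prop := out = unsign2hex_alt ls
instance (ls : List Int) (out : String) : Decidable (Spec_unsign2hex ls out) := by unfold Spec_unsign2hex; infer_instance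

-- ===== CLAIM (what is proved, stated in full; the proofs are below) =====
def Claim_equal_unsign2hex : Prop := ∀ (ls : List Int), Dom_unsign2hex ls → Pre_unsign2hex ls → Spec_unsign2hex ls (unsign2hex ls)

-- ===== LEMMAS AND PROOFS =====

def IsBin (cs : List Char) : Prop := ∀ c ∈ cs, c = '0' ∨ c = '1'

theorem parse_from (cs : List Char) (a : Nat) :
    cs.foldl (fun a c => 2 * a + (if c = '1' then 1 else 0)) a
      = a * 2 ^ cs.length + parseBin cs := by
  induction cs generalizing a with
  | nil => simp [parseBin]
  | cons c cs ih =>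
      simp only [List.foldl_cons, List.length_cons, parseBin] at *
      rw [ih, ih (2 * 0 + (if c = '1' then 1 else 0))]
      ring

theorem parse_append (xs ys : List Char) :
    parseBin (xs ++ ys) = parseBin xs * 2 ^ ys.length + parseBin ys := by
  unfold parseBin
  rw [List.foldl_append, parse_from]
  rfl

theorem natBits_parse (n : Nat) : parseBin (natBits n) = n := by
  induction n using Nat.strong_induction_on with
  | _ n ih =>
    match n with
    | 0 => simp [natBits, parseBin]
    | n + 1 =>
      rw [natBits, parse_append, ih ((n + 1) / 2) (Nat.div_lt_self (Nat.succ_pos n) (by omega))]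
      have h := Nat.div_add_mod (n + 1) 2
      have h2 : (n + 1) % 2 < 2 := Nat.mod_lt _ (by omega)
      have hcase : (n + 1) % 2 = 0 ∨ (n + 1) % 2 = 1 := by omega
      rcases hcase with h0 | h1
      · simp [parseBin, h0]; omega
      · simp [parseBin, h1]; omega

theorem natBits_len (n : Nat) : (natBits n).length = bitLen n := by
  induction n using Nat.strong_induction_on with
  | _ n ih =>
    match n with
    | 0 => simp [natBits, bitLen]
    | n + 1 =>
      rw [natBits, bitLen, List.length_append,
        ih ((n + 1) / 2) (Nat.div_lt_self (Nat.succ_pos n) (by omega))]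
      simp

theorem natBits_isBin (n : Nat) : IsBin (natBits n) := by
  induction n using Nat.strong_induction_on with
  | _ n ih =>
    match n with
    | 0 => simp [natBits, IsBin]
    | n + 1 =>
      rw [natBits]
      intro c hc
      rcases List.mem_append.mp hc with h | h
      · exact ih ((n + 1) / 2) (Nat.div_lt_self (Nat.succ_pos n) (by omega)) c h
      · simp only [List.mem_singleton] at h
        subst h
        split <;> simp

theorem parse_lt (cs : List Char) (h : IsBin cs) : parseBin cs < 2 ^ cs.length := by
  induction cs with
  | nil => simp [parseBin]
  | cons c cs ih =>
      have hcs : IsBin cs := fun d hd => h d (List.mem_cons_of_mem _ hd)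
      have := ih hcs
      have hb : (if c = '1' then (1:Nat) else 0) ≤ 1 := by split <;> omega
      simp only [parseBin, List.foldl_cons, List.length_cons] at *
      have hp : parseBin cs < 2 ^ cs.length := this
      rw [parse_from, pow_succ]
      nlinarith [hp, hb]

theorem parse_replicate_zero (k : Nat) : parseBin (List.replicate k '0') = 0 := by
  induction k with
  | zero => rfl
  | succ k ih =>
      rw [List.replicate_succ', parse_append, ih]
      simp [parseBin]

theorem binChars_parse (n : Nat) : parseBin (binChars n) = n := by
  unfold binChars
  split
  · simp_all [parseBin]
  · exact natBits_parse n

theorem binChars_isBin (n : Nat) : IsBin (binChars n) := by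
  unfold binChars
  split
  · simp [IsBin]
  · exact natBits_isBin n

theorem binChars_len (n : Nat) : (binChars n).length = if n = 0 then 1 else bitLen n := by
  unfold binChars
  split <;> simp_all [natBits_len]

theorem pad_len (n : Nat) :
    (if (binChars n).length < 8
      then List.replicate (8 - (binChars n).length) '0' ++ binChars n
      else binChars n).length = max 8 (bitLen n) := by
  have hlen := binChars_len n
  have hbl0 : bitLen 0 = 0 := by simp [bitLen]
  split
  · rename_i hc
    simp only [List.length_append, List.length_replicate]
    by_cases h0 : n = 0
    · subst h0; rw [hbl0]; simp at hlen; omega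
    · simp [h0] at hlen; omega
  · rename_i hc
    by_cases h0 : n = 0
    · subst h0; simp at hlen; omega
    · simp [h0] at hlen; omega

theorem stepA_parse (string : List Char) (e : Int) :
    parseBin (stepA string e)
      = parseBin string * 2 ^ (max 8 (bitLen e.toNat)) + e.toNat := by
  unfold stepA
  rw [parse_append, pad_len]
  congr 1
  split
  · rw [parse_append, parse_replicate_zero, binChars_parse]
    omega
  · exact binChars_parse e.toNat

theorem stepA_len (string : List Char) (e : Int) :
    (stepA string e).length = string.length + max 8 (bitLen e.toNat) := by
  unfold stepA
  rw [List.length_append, pad_len]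

theorem stepA_isBin (string : List Char) (e : Int) (h : IsBin string) :
    IsBin (stepA string e) := by
  intro c hc
  simp only [stepA] at hc
  have hb := binChars_isBin e.toNat
  split at hc <;> rcases List.mem_append.mp hc with h1 | h1
  · exact h c h1
  · rcases List.mem_append.mp h1 with h2 | h2
    · left; exact List.eq_of_mem_replicate h2
    · exact hb c h2
  · exact h c h1
  · exact hb c h1

theorem lt_two_pow_bitLen (n : Nat) : n < 2 ^ bitLen n := by
  induction n using Nat.strong_induction_on with
  | _ n ih =>
    match n with
    | 0 => simp [bitLen]
    | n + 1 =>
      rw [bitLen, pow_succ]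
      have := ih ((n + 1) / 2) (Nat.div_lt_self (Nat.succ_pos n) (by omega))
      omega

-- B's or-accumulation equals A's concatenation arithmetic, step by step
theorem stepB_eq (p : Nat × Nat) (e : Int) :
    stepB p e = (p.1 * 2 ^ (max 8 (bitLen e.toNat)) + e.toNat, p.2 + max 8 (bitLen e.toNat)) := by
  show (p.1 <<< (max 8 (bitLen e.toNat)) ||| e.toNat, p.2 + max 8 (bitLen e.toNat)) = _
  have hlt : e.toNat < 2 ^ max 8 (bitLen e.toNat) :=
    lt_of_lt_of_le (lt_two_pow_bitLen e.toNat)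
      (Nat.pow_le_pow_right (by omega) (le_max_right _ _))
  rw [← Nat.shiftLeft_add_eq_or_of_lt hlt, Nat.shiftLeft_eq]

-- loop invariant: B's (value, width) are the parse and length of A's growing bit-string
theorem fold_inv (ls : List Int) (acc : List Char) (h : IsBin acc) :
    ls.foldl stepB (parseBin acc, acc.length)
      = (parseBin (ls.foldl stepA acc), (ls.foldl stepA acc).length) ∧
    IsBin (ls.foldl stepA acc) := by
  induction ls generalizing acc with
  | nil => exact ⟨rfl, h⟩
  | cons e ls ih =>
      simp only [List.foldl_cons]
      rw [stepB_eq, ← stepA_parse, ← stepA_len]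
      exact ih (stepA acc e) (stepA_isBin acc e h)

-- the final shift: drop the leading bit and append a '0' = double modulo 2^length
theorem shift_eq (s : List Char) (h : IsBin s) :
    parseBin (s.drop 1 ++ ['0']) = (parseBin s <<< 1) &&& ((1 <<< s.length) - 1) := by
  rw [Nat.one_shiftLeft, Nat.and_two_pow_sub_one_eq_mod, Nat.shiftLeft_eq, pow_one]
  cases s with
  | nil => simp [parseBin]
  | cons c rest =>
      have hrest : IsBin rest := fun d hd => h d (List.mem_cons_of_mem _ hd)
      have hplt : parseBin rest < 2 ^ rest.length := parse_lt rest hrest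
      have hcons : parseBin (c :: rest)
          = (if c = '1' then 1 else 0) * 2 ^ rest.length + parseBin rest := by
        show List.foldl _ (2 * 0 + (if c = '1' then 1 else 0)) rest = _
        rw [parse_from]; ring_nf
      have happ : parseBin (rest ++ ['0']) = parseBin rest * 2 := by
        rw [parse_append]; simp [parseBin]
      have hb : (if c = '1' then (1:Nat) else 0) ≤ 1 := by split <;> omega
      simp only [List.drop_succ_cons, List.drop_zero, List.length_cons]
      rw [happ, hcons, pow_succ]
      rcases Nat.le_one_iff_eq_zero_or_eq_one.mp hb with h0 | h1
      · rw [h0]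
        rw [Nat.mod_eq_of_lt (by omega)]
        ring
      · rw [h1]
        have : ((1 * 2 ^ rest.length + parseBin rest) * 2) % (2 ^ rest.length * 2)
            = parseBin rest * 2 := by
          rw [Nat.one_mul, Nat.add_mul, Nat.add_comm, Nat.add_mod_right,
            Nat.mod_eq_of_lt (by omega)]
        omega

-- ===== VERDICT (by name: the statement is the Claim_ definition above) =====
theorem unsign2hex_spec : Claim_equal_unsign2hex := by
  unfold Claim_equal_unsign2hex
  intro ls _ _
  unfold Spec_unsign2hex unsign2hex unsign2hex_alt
  obtain ⟨hfold, hbin⟩ := fold_inv ls [] (by simp [IsBin])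
  simp only [show parseBin ([] : List Char) = 0 from rfl, List.length_nil] at hfold
  rw [hfold]
  exact congrArg pyHex (shift_eq _ hbin)
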